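-- pv_equiv track=rewrite | github.com/ChlupacTheBosmer/DetectFlow | detectflow/utils/input.py | validate_flags
-- ===== SOURCE A (Python) =====
-- from typing import List, Dict, Tuple, Union
--
-- def validate_flags(input_flags: Union[str, int, List[Union[str, int]], Tuple[Union[str, int], ...]],
--                    flag_map: Union[Dict[int, str], List[str], Tuple[str, ...]],
--                    fix: bool = False) -> List[str]:
--
--     # Check if flag_map is a list or tuple, convert it to a dictionary if so
--     if isinstance(flag_map, (list, tuple)):
--         flag_map = {i: flag for i, flag in enumerate(flag_map)}
--     allowed_flags = set(flag_map.values())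
--
--     if isinstance(input_flags, str):
--         if input_flags not in allowed_flags:
--             if fix:
--                 return []
--             else:
--                 raise ValueError("Invalid flag string")
--         input_flags = [input_flags]
--     elif isinstance(input_flags, int):
--         if input_flags not in flag_map:
--             if fix:
--                 return []
--             else:
--                 raise ValueError("Invalid flag integer")
--         input_flags = [flag_map[input_flags]]
--     elif isinstance(input_flags, (list, tuple)):
--         new_flags = []
--         for flag in input_flags:
--             if isinstance(flag, int):
--                 if flag not in flag_map:
--                     if not fix:
--                         raise ValueError("Invalid flag integer")
--                     continue  # Skip invalid integers if fixing
--                 new_flags.append(flag_map[flag])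
--             elif isinstance(flag, str):
--                 if flag not in allowed_flags:
--                     if not fix:
--                         raise ValueError("Invalid flag string")
--                     continue  # Skip invalid strings if fixing
--                 new_flags.append(flag)
--             else:
--                 raise TypeError("Each flag should be either an integer or a string")
--         input_flags = new_flags
--     else:
--         raise TypeError("Input flags should be a string, integer, list, or tuple")
--
--     return input_flags
-- ===== SOURCE B (Python) =====
-- def validate_flags(input_flags, flag_map, fix=False):
--     # normalize the mapping to key/value pairs; no dict or set is built
--     if isinstance(flag_map, (list, tuple)):
--         items = list(enumerate(flag_map))
--     else:
--         items = list(flag_map.items())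
--
--     if isinstance(input_flags, (str, int)):
--         flags = [input_flags]
--     elif isinstance(input_flags, (list, tuple)):
--         flags = list(input_flags)
--     else:
--         raise TypeError("Input flags should be a string, integer, list, or tuple")
--
--     def go(rest):
--         # recursive: resolve the head by a linear scan over the pairs, cons onto the rest
--         if not rest:
--             return []
--         flag = rest[0]
--         if isinstance(flag, int):
--             for k, v in items:
--                 if k == flag:
--                     return [v] + go(rest[1:])
--             if fix:
--                 return go(rest[1:])
--             raise ValueError("Invalid flag integer")
--         if isinstance(flag, str):
--             for _, v in items:
--                 if v == flag:
--                     return [flag] + go(rest[1:])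
--             if fix:
--                 return go(rest[1:])
--             raise ValueError("Invalid flag string")
--         raise TypeError("Each flag should be either an integer or a string")
--
--     return go(flags)
-- ===== Notes on version B (the rewrite author's own statement) =====
-- stated objective: alternative
-- what changed: B builds no dict and no set of allowed values: it normalizes the mapping once to key/value pairs and resolves the flags by structural recursion (cons head onto the recursive result), deciding each flag's validity by a direct linear scan over the pairs instead of hashed set/dict membership.
import Mathlib
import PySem

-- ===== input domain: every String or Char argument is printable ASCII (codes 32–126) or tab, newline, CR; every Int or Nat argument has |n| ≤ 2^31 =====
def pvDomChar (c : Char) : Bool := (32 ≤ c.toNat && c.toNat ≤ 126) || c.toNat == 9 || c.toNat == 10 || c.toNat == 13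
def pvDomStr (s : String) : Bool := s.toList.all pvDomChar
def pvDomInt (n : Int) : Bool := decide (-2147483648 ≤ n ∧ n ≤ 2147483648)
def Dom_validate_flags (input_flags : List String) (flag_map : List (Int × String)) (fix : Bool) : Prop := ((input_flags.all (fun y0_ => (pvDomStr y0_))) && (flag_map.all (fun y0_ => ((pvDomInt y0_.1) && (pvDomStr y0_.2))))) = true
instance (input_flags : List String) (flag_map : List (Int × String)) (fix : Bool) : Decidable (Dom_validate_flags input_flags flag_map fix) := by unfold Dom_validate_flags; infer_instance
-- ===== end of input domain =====

-- B drops A's dict/set machinery entirely: a recursive pass over the flags that resolves each one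
-- by a linear scan over the raw key/value pairs (alternative decomposition, O(n·m) instead of O(n+m)).
-- Under the type convention input_flags is a list of strings, so only A's list-of-str branch is reachable.

-- ===== PORT A =====
-- A: flag_map is normalized to a dict, allowed_flags = set(flag_map.values()); accumulator loop
-- appending valid strings, skipping invalid ones when fix (the not-fix raise is excluded by Pre_).
def validate_flags (input_flags : List String) (flag_map : List (Int × String)) (fix : Bool) : List String :=
  let allowed_flags := PySem.Set.ofList ((PySem.Dict.mk flag_map).values)
  input_flags.foldl
    (fun new_flags flag =>
      if PySem.Set.contains allowed_flags flag then new_flags ++ [flag] else new_flags)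
    []

-- ===== PORT B =====
-- B's inner for-loop over the pairs: does any pair's value equal the flag?
def pvScanStr (items : List (Int × String)) (flag : String) : Bool :=
  match items with
  | [] => false
  | (_, v) :: t => if v == flag then true else pvScanStr t flag

-- B's recursive go: cons the resolved head onto go(rest); skip when unresolved (with fix; the
-- not-fix raise is excluded by Pre_).
def pvGoB (items : List (Int × String)) (fix : Bool) (rest : List String) : List String :=
  match rest with
  | [] => []
  | flag :: rest' =>
    if pvScanStr items flag then flag :: pvGoB items fix rest' else pvGoB items fix rest'

-- B: items = list(flag_map.items()) (the dict's pairs), then the recursion; no dict or set built.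
def validate_flags_alt (input_flags : List String) (flag_map : List (Int × String)) (fix : Bool) : List String :=
  let items := (PySem.Dict.mk flag_map).items
  pvGoB items fix input_flags

-- ===== PRECONDITION & SPEC =====
-- A raises ValueError("Invalid flag string") when fix is false and some flag is not among
-- flag_map's values; Pre_ excludes exactly those inputs (B raises there too).
def Pre_validate_flags (input_flags : List String) (flag_map : List (Int × String)) (fix : Bool) : Prop :=
  fix = true ∨ ∀ f ∈ input_flags, f ∈ flag_map.map Prod.snd
instance (input_flags : List String) (flag_map : List (Int × String)) (fix : Bool) : Decidable (Pre_validate_flags input_flags flag_map fix) := by unfold Pre_validate_flags; infer_instance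

def pvWitness_validate_flags : List String × (List (Int × String)) × Bool :=
  (["a", "b"], [(0, "a"), (1, "b")], false)

def Spec_validate_flags (input_flags : List String) (flag_map : List (Int × String)) (fix : Bool) (out : List String) : Prop := out = validate_flags_alt input_flags flag_map fix
instance (input_flags : List String) (flag_map : List (Int × String)) (fix : Bool) (out : List String) : Decidable (Spec_validate_flags input_flags flag_map fix out) := by unfold Spec_validate_flags; infer_instance

-- ===== CLAIM (what is proved, stated in full; the proofs are below) =====
def Claim_equal_validate_flags : Prop := ∀ (input_flags : List String) (flag_map : List (Int × String)) (fix : Bool), Dom_validate_flags input_flags flag_map fix → Pre_validate_flags input_flags flag_map fix → Spec_validate_flags input_flags flag_map fix (validate_flags input_flags flag_map fix)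

-- ===== LEMMAS AND PROOFS =====
theorem pvScanStr_iff (items : List (Int × String)) (flag : String) :
    pvScanStr items flag = true ↔ flag ∈ items.map Prod.snd := by
  induction items with
  | nil => simp [pvScanStr]
  | cons p t ih =>
    obtain ⟨k, v⟩ := p
    simp only [pvScanStr, List.map_cons, List.mem_cons]
    by_cases h : v = flag
    · simp [h]
    · have hb : (v == flag) = false := by simp [h]
      rw [hb]
      simp only [Bool.false_eq_true, if_false, ih]
      constructor
      · exact Or.inr
      · rintro (rfl | hm)
        · exact absurd rfl h
        · exact hm

theorem pvGoB_eq_filter (items : List (Int × String)) (fix : Bool) (l : List String) :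
    pvGoB items fix l = l.filter (fun f => pvScanStr items f) := by
  induction l with
  | nil => rfl
  | cons x t ih =>
    rw [List.filter_cons]
    by_cases h : pvScanStr items x = true <;> simp [pvGoB, h, ih]

-- ===== VERDICT (by name: the statement is the Claim_ definition above) =====
theorem validate_flags_spec : Claim_equal_validate_flags := by
  intro input_flags flag_map fix _ _
  unfold Spec_validate_flags validate_flags validate_flags_alt
  rw [PySem.List.foldl_append_if_eq_filter, List.nil_append, pvGoB_eq_filter]
  apply List.filter_congr
  intro x _
  have hA : PySem.Set.contains (PySem.Set.ofList ((PySem.Dict.mk flag_map).values)) x = true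
      ↔ x ∈ flag_map.map Prod.snd := by
    rw [PySem.Set.contains_iff, PySem.Set.mem_ofList]
    rfl
  have hB := pvScanStr_iff ((PySem.Dict.mk flag_map).items) x
  exact Bool.eq_iff_iff.mpr (hA.trans hB.symm)
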